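-- pv_equiv track=rewrite | github.com/KULeuven-MICAS/htvm | sirius/byoc/plotting.py | preprocess_cycle_counts
-- ===== SOURCE A (Python) =====
-- def preprocess_cycle_counts(names, cycle_counts):
--     keys = names
--     values = cycle_counts
--     total_dory = 0
--     total_tvm = 0
--     def is_dory_function(name):
--         return "soma_dory_main" in name
--     for name, cycles in zip(keys,values):
--         if is_dory_function(name):
--             total_dory += cycles
--         else:
--             total_tvm += cycles
--     return total_dory, total_tvm, total_dory+total_tvm
-- ===== SOURCE B (Python) =====
-- def preprocess_cycle_counts(names, cycle_counts):
--     pairs = list(zip(names, cycle_counts))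
--
--     def solve(lo, hi):
--         # triple (total_dory, total_tvm, total) for pairs[lo:hi], by halving
--         if lo >= hi:
--             return (0, 0, 0)
--         if hi - lo == 1:
--             name, cycles = pairs[lo]
--             if "soma_dory_main" in name:
--                 return (cycles, 0, cycles)
--             return (0, cycles, cycles)
--         mid = (lo + hi) // 2
--         d1, t1, s1 = solve(lo, mid)
--         d2, t2, s2 = solve(mid, hi)
--         return (d1 + d2, t1 + t2, s1 + s2)
--
--     return solve(0, len(pairs))
-- ===== Notes on version B (the rewrite author's own statement) =====
-- stated objective: alternative
-- what changed: Replaces A's single linear accumulating loop with a balanced divide-and-conquer over the zipped pairs: each half returns a (dory, tvm, total) triple and the triples are merged componentwise.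
import Mathlib
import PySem

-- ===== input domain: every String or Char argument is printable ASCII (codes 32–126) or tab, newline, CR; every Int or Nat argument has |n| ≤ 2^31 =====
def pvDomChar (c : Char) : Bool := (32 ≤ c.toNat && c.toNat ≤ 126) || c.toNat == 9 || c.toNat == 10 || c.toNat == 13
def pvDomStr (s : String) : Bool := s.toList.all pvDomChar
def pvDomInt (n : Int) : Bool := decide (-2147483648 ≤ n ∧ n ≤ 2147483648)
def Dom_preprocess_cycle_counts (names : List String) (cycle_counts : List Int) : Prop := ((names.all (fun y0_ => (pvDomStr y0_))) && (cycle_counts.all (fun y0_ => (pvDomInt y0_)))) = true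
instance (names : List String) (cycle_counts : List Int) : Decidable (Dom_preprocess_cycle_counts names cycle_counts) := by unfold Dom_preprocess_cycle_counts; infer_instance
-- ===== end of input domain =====

-- B replaces A's single linear accumulating loop with a balanced divide-and-conquer over the zipped pairs (alternative decomposition, same cost).


-- ===== PORT A =====
-- literal port of A: one pass over zip(names, cycle_counts) with two running totals,
-- branching on whether "soma_dory_main" occurs in the name
def preprocess_cycle_counts (names : List String) (cycle_counts : List Int) : Int × Int × Int :=
  let st := (names.zip cycle_counts).foldl
    (fun (s : Int × Int) p =>
      if PySem.Str.isIn "soma_dory_main" p.1 then (s.1 + p.2, s.2) else (s.1, s.2 + p.2))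
    (0, 0)
  (st.1, st.2, st.1 + st.2)

-- ===== PORT B =====
-- port of B's solve(lo, hi): divide-and-conquer on the slice of zipped pairs,
-- halving the slice and merging the two (dory, tvm, total) triples componentwise;
-- the dory test is passed in as the predicate f
def pvSolveB (f : String × Int → Bool) : List (String × Int) → Int × Int × Int
  | [] => (0, 0, 0)
  | [p] => if f p then (p.2, 0, p.2) else (0, p.2, p.2)
  | p :: q :: rest =>
      let l := p :: q :: rest
      let mid := l.length / 2
      let L := pvSolveB f (l.take mid)
      let R := pvSolveB f (l.drop mid)
      (L.1 + R.1, L.2.1 + R.2.1, L.2.2 + R.2.2)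
termination_by l => l.length
decreasing_by
  · simp [List.length_take]; omega
  · simp [List.length_drop]; omega

def preprocess_cycle_counts_alt (names : List String) (cycle_counts : List Int) : Int × Int × Int :=
  pvSolveB (fun p => PySem.Str.isIn "soma_dory_main" p.1) (names.zip cycle_counts)

-- ===== PRECONDITION & SPEC =====
def Spec_preprocess_cycle_counts (names : List String) (cycle_counts : List Int) (out : Int × Int × Int) : Prop := out = preprocess_cycle_counts_alt names cycle_counts
instance (names : List String) (cycle_counts : List Int) (out : Int × Int × Int) : Decidable (Spec_preprocess_cycle_counts names cycle_counts out) := by unfold Spec_preprocess_cycle_counts; infer_instance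

-- ===== CLAIM (what is proved, stated in full; the proofs are below) =====
def Claim_equal_preprocess_cycle_counts : Prop := ∀ (names : List String) (cycle_counts : List Int), Dom_preprocess_cycle_counts names cycle_counts → Spec_preprocess_cycle_counts names cycle_counts (preprocess_cycle_counts names cycle_counts)

-- ===== LEMMAS AND PROOFS =====

-- the characterising sums: matching cycles, non-matching cycles, all cycles
def pvD (f : String × Int → Bool) (l : List (String × Int)) : Int :=
  ((l.filter f).map (fun p => p.2)).sum
def pvN (f : String × Int → Bool) (l : List (String × Int)) : Int :=
  ((l.filter (fun p => !(f p))).map (fun p => p.2)).sum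
def pvS (l : List (String × Int)) : Int :=
  (l.map (fun p => p.2)).sum

theorem pvD_append (f : String × Int → Bool) (a b : List (String × Int)) :
    pvD f (a ++ b) = pvD f a + pvD f b := by simp [pvD]
theorem pvN_append (f : String × Int → Bool) (a b : List (String × Int)) :
    pvN f (a ++ b) = pvN f a + pvN f b := by simp [pvN]
theorem pvS_append (a b : List (String × Int)) : pvS (a ++ b) = pvS a + pvS b := by simp [pvS]

-- B's divide-and-conquer computes exactly these three sums
theorem pvSolveB_eq (f : String × Int → Bool) (l : List (String × Int)) :
    pvSolveB f l = (pvD f l, pvN f l, pvS l) := by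
  induction l using pvSolveB.induct f with
  | case1 => simp [pvSolveB, pvD, pvN, pvS]
  | case2 p h => simp [pvSolveB, pvD, pvN, pvS, h]
  | case3 p h => simp [pvSolveB, pvD, pvN, pvS, h]
  | case4 p q rest l mid ihL ihR =>
      rw [pvSolveB]
      rw [ihL, ihR]
      have hsplit : (p :: q :: rest).take ((p :: q :: rest).length / 2)
          ++ (p :: q :: rest).drop ((p :: q :: rest).length / 2) = p :: q :: rest :=
        List.take_append_drop _ _
      refine Prod.ext ?_ (Prod.ext ?_ ?_) <;> simp only []
      · rw [← pvD_append, hsplit]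
      · rw [← pvN_append, hsplit]
      · rw [← pvS_append, hsplit]

-- A's fold computes the same two partial sums
theorem pv_fold_eq (f : String × Int → Bool) (l : List (String × Int)) : ∀ (a b : Int),
    l.foldl (fun (s : Int × Int) p =>
      if f p then (s.1 + p.2, s.2) else (s.1, s.2 + p.2)) (a, b)
    = (a + pvD f l, b + pvN f l) := by
  induction l with
  | nil => intro a b; simp [pvD, pvN]
  | cons h t ih =>
      intro a b
      by_cases hd : f h
      · simp [pvD, pvN, hd, ih, add_assoc]
      · simp [pvD, pvN, hd, ih, add_assoc]

theorem pv_sum_split (f : String × Int → Bool) (l : List (String × Int)) :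
    pvD f l + pvN f l = pvS l := by
  induction l with
  | nil => simp [pvD, pvN, pvS]
  | cons h t ih =>
      by_cases hd : f h <;> (simp [pvD, pvN, pvS, hd] at ih ⊢; omega)

-- ===== VERDICT (by name: the statement is the Claim_ definition above) =====
theorem preprocess_cycle_counts_spec : Claim_equal_preprocess_cycle_counts := by
  intro names cycle_counts _
  unfold Spec_preprocess_cycle_counts preprocess_cycle_counts preprocess_cycle_counts_alt
  rw [pvSolveB_eq]
  simp only [pv_fold_eq (fun p => PySem.Str.isIn "soma_dory_main" p.1), zero_add]
  exact Prod.ext rfl (Prod.ext rfl (pv_sum_split _ _))
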